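-- pv_equiv track=rewrite | github.com/Gholgot/farmbuddy | tools/build_mountdb.py | derive_difficulty_id
-- ===== SOURCE A (Python) =====
-- EXPANSION_INDEX = {
--     "CLASSIC": 0, "TBC": 1, "WOTLK": 2, "CATA": 3, "MOP": 4,
--     "WOD": 5, "LEGION": 6, "BFA": 7, "SL": 8, "DF": 9, "TWW": 10,
--     "MIDNIGHT": 11,
-- }
--
-- def derive_difficulty_id(difficulties, expansion, mythic_only=False):
--     """Derive the primary difficultyID from Rarity difficulties list."""
--     if not difficulties and not mythic_only:
--         return None
--
--     if mythic_only:
--         return 16  # MYTHIC_RAID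
--
--     # Priority: Mythic > Mythic Dungeon > Heroic Raid > Heroic 25 > Heroic 10 > Normal Raid > Normal 25 > Normal 10 > Heroic Dungeon > LFR > None
--     priority = [16, 23, 15, 6, 5, 14, 4, 3, 2, 17, 0]
--     for did in priority:
--         if did in difficulties:
--             return did
--
--     # Fallback by expansion era
--     if expansion:
--         idx = EXPANSION_INDEX.get(expansion, 5)
--         if idx <= 5:  # Classic through WoD
--             if 6 in difficulties or 5 in difficulties:
--                 return 6  # 25H
--             return 4  # 25N
--         else:  # Legion+
--             return 16  # Mythic
--
--     return difficulties[0] if difficulties else None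
-- ===== SOURCE B (Python) =====
-- # B: inverted priority pass — prebuilt rank table, scan difficulties once, take minimal rank.
-- EXPANSION_INDEX = {
--     "CLASSIC": 0, "TBC": 1, "WOTLK": 2, "CATA": 3, "MOP": 4,
--     "WOD": 5, "LEGION": 6, "BFA": 7, "SL": 8, "DF": 9, "TWW": 10,
--     "MIDNIGHT": 11,
-- }
--
-- def derive_difficulty_id(difficulties, expansion, mythic_only=False):
--     """Derive the primary difficultyID from Rarity difficulties list."""
--     if not difficulties and not mythic_only:
--         return None
--
--     if mythic_only:
--         return 16  # MYTHIC_RAID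
--
--     priority = [16, 23, 15, 6, 5, 14, 4, 3, 2, 17, 0]
--     rank = {did: i for i, did in enumerate(priority)}
--     candidates = [rank[d] for d in difficulties if d in rank]
--     if candidates:
--         return priority[min(candidates)]
--
--     # Fallback by expansion era
--     if expansion:
--         idx = EXPANSION_INDEX.get(expansion, 5)
--         if idx <= 5:  # Classic through WoD
--             if 6 in difficulties or 5 in difficulties:
--                 return 6  # 25H
--             return 4  # 25N
--         else:  # Legion+
--             return 16  # Mythic
--
--     return difficulties[0] if difficulties else None
-- ===== Notes on version B (the rewrite author's own statement) =====
-- stated objective: alternative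
-- what changed: The priority-list scan with an inner membership test per priority id is replaced by a prebuilt rank table and a single pass over difficulties collecting ranks, returning the priority id of minimal rank; guards and the expansion fallback are unchanged.
import Mathlib
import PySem

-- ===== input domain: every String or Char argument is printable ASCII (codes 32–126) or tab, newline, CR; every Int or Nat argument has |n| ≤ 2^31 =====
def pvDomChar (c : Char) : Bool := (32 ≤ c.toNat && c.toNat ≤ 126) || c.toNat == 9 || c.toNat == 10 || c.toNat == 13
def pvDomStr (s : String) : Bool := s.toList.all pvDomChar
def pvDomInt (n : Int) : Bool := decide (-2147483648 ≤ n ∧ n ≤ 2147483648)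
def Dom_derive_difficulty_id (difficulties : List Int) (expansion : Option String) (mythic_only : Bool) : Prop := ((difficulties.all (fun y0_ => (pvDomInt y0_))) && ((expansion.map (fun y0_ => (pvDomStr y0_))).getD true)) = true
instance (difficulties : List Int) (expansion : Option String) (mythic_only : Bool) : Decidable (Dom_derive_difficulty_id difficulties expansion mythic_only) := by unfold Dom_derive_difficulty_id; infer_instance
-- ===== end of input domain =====

-- B replaces the priority-list scan by a prebuilt rank table indexed while scanning `difficulties` once,
-- returning the priority id of minimal rank; guards and fallback are unchanged (objective: alternative).

-- ===== PORT A =====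
def pvPriority : List Int := [16, 23, 15, 6, 5, 14, 4, 3, 2, 17, 0]

def pvExpansionIndex : PySem.Dict String Int :=
  PySem.Dict.ofList [("CLASSIC", 0), ("TBC", 1), ("WOTLK", 2), ("CATA", 3), ("MOP", 4),
    ("WOD", 5), ("LEGION", 6), ("BFA", 7), ("SL", 8), ("DF", 9), ("TWW", 10), ("MIDNIGHT", 11)]

-- A's "for did in priority: if did in difficulties: return did" loop
def pvLoopA (ps : List Int) (diffs : List Int) : Option Int :=
  match ps with
  | [] => none
  | p :: rest => if p ∈ diffs then some p else pvLoopA rest diffs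

def derive_difficulty_id (difficulties : List Int) (expansion : Option String) (mythic_only : Bool) : Option Int :=
  if difficulties = [] ∧ mythic_only = false then none
  else if mythic_only then some 16
  else
    match pvLoopA pvPriority difficulties with
    | some did => some did
    | none =>
      -- `if expansion:` — None and "" are falsy
      match expansion with
      | some e =>
        if e = "" then (match difficulties with | [] => none | d :: _ => some d)
        else
          let idx := pvExpansionIndex.getD e 5
          if idx ≤ 5 then
            (if 6 ∈ difficulties ∨ 5 ∈ difficulties then some 6 else some 4)
          else some 16
      | none => (match difficulties with | [] => none | d :: _ => some d)

-- ===== PORT B =====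
-- rank = {did: i for i, did in enumerate(priority)}
def pvRank : PySem.Dict Int Int :=
  (PySem.List.enumerate pvPriority 0).foldl (fun d p => d.insert p.2 p.1) PySem.Dict.empty

-- candidates = [rank[d] for d in difficulties if d in rank]  (get? combines the membership test and the lookup; exact)
def pvCandidates (diffs : List Int) : List Int :=
  diffs.foldl (fun acc d => match pvRank.get? d with | some r => acc ++ [r] | none => acc) []

def derive_difficulty_id_alt (difficulties : List Int) (expansion : Option String) (mythic_only : Bool) : Option Int :=
  if difficulties = [] ∧ mythic_only = false then none
  else if mythic_only then some 16
  else
    let c := pvCandidates difficulties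
    if c = [] then
      -- fallback, identical to A's
      match expansion with
      | some e =>
        if e = "" then (match difficulties with | [] => none | d :: _ => some d)
        else
          let idx := pvExpansionIndex.getD e 5
          if idx ≤ 5 then
            (if 6 ∈ difficulties ∨ 5 ∈ difficulties then some 6 else some 4)
          else some 16
      | none => (match difficulties with | [] => none | d :: _ => some d)
    else
      match PySem.List.min? c (fun x => x) with
      | some m => PySem.List.pyGet? pvPriority m
      | none => none

-- ===== PRECONDITION & SPEC =====
def Spec_derive_difficulty_id (difficulties : List Int) (expansion : Option String) (mythic_only : Bool) (out : Option Int) : Prop := out = derive_difficulty_id_alt difficulties expansion mythic_only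
instance (difficulties : List Int) (expansion : Option String) (mythic_only : Bool) (out : Option Int) : Decidable (Spec_derive_difficulty_id difficulties expansion mythic_only out) := by unfold Spec_derive_difficulty_id; infer_instance

-- ===== CLAIM (what is proved, stated in full; the proofs are below) =====
def Claim_equal_derive_difficulty_id : Prop := ∀ (difficulties : List Int) (expansion : Option String) (mythic_only : Bool), Dom_derive_difficulty_id difficulties expansion mythic_only → Spec_derive_difficulty_id difficulties expansion mythic_only (derive_difficulty_id difficulties expansion mythic_only)

-- ===== LEMMAS AND PROOFS =====

lemma pvRank_eq : pvRank = ((((((((((PySem.Dict.empty.insert 16 0).insert 23 1).insert 15 2).insert 6 3).insert 5 4).insert 14 5).insert 4 6).insert 3 7).insert 2 8).insert 17 9).insert 0 10 := by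
  decide

-- which (key, value) pairs the rank table holds
lemma pvRank_cases (d r : Int) (h : pvRank.get? d = some r) :
    (d = 16 ∧ r = 0) ∨ (d = 23 ∧ r = 1) ∨ (d = 15 ∧ r = 2) ∨ (d = 6 ∧ r = 3) ∨ (d = 5 ∧ r = 4) ∨
    (d = 14 ∧ r = 5) ∨ (d = 4 ∧ r = 6) ∨ (d = 3 ∧ r = 7) ∨ (d = 2 ∧ r = 8) ∨ (d = 17 ∧ r = 9) ∨
    (d = 0 ∧ r = 10) := by
  by_cases h16 : d = 16
  · subst h16; rw [show pvRank.get? 16 = some 0 from by decide] at h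
    exact Or.inl ⟨rfl, (Option.some_injective _ h).symm⟩
  by_cases h23 : d = 23
  · subst h23; rw [show pvRank.get? 23 = some 1 from by decide] at h
    exact Or.inr (Or.inl ⟨rfl, (Option.some_injective _ h).symm⟩)
  by_cases h15 : d = 15
  · subst h15; rw [show pvRank.get? 15 = some 2 from by decide] at h
    simp_all
  by_cases h6 : d = 6
  · subst h6; rw [show pvRank.get? 6 = some 3 from by decide] at h
    simp_all
  by_cases h5 : d = 5
  · subst h5; rw [show pvRank.get? 5 = some 4 from by decide] at h
    simp_all
  by_cases h14 : d = 14
  · subst h14; rw [show pvRank.get? 14 = some 5 from by decide] at h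
    simp_all
  by_cases h4 : d = 4
  · subst h4; rw [show pvRank.get? 4 = some 6 from by decide] at h
    simp_all
  by_cases h3 : d = 3
  · subst h3; rw [show pvRank.get? 3 = some 7 from by decide] at h
    simp_all
  by_cases h2 : d = 2
  · subst h2; rw [show pvRank.get? 2 = some 8 from by decide] at h
    simp_all
  by_cases h17 : d = 17
  · subst h17; rw [show pvRank.get? 17 = some 9 from by decide] at h
    simp_all
  by_cases h0 : d = 0
  · subst h0; rw [show pvRank.get? 0 = some 10 from by decide] at h
    simp_all
  · exfalso
    rw [pvRank_eq, PySem.Dict.get?_insert_of_ne _ _ h0, PySem.Dict.get?_insert_of_ne _ _ h17,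
        PySem.Dict.get?_insert_of_ne _ _ h2, PySem.Dict.get?_insert_of_ne _ _ h3,
        PySem.Dict.get?_insert_of_ne _ _ h4, PySem.Dict.get?_insert_of_ne _ _ h14,
        PySem.Dict.get?_insert_of_ne _ _ h5, PySem.Dict.get?_insert_of_ne _ _ h6,
        PySem.Dict.get?_insert_of_ne _ _ h15, PySem.Dict.get?_insert_of_ne _ _ h23,
        PySem.Dict.get?_insert_of_ne _ _ h16] at h
    simp [PySem.Dict.get?, PySem.Dict.empty] at h

lemma mem_foldl_cand (diffs : List Int) (acc : List Int) (x : Int) :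
    x ∈ diffs.foldl (fun acc d => match pvRank.get? d with | some r => acc ++ [r] | none => acc) acc ↔
    x ∈ acc ∨ ∃ d ∈ diffs, pvRank.get? d = some x := by
  induction diffs generalizing acc with
  | nil => simp
  | cons d t ih =>
    simp only [List.foldl_cons]
    cases hg : pvRank.get? d with
    | none =>
      rw [ih]
      constructor
      · rintro (h | ⟨e, he, hx⟩)
        · exact Or.inl h
        · exact Or.inr ⟨e, List.mem_cons_of_mem _ he, hx⟩
      · rintro (h | ⟨e, he, hx⟩)
        · exact Or.inl h
        · rcases List.mem_cons.mp he with rfl | he'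
          · rw [hg] at hx; exact absurd hx (by simp)
          · exact Or.inr ⟨e, he', hx⟩
    | some r =>
      rw [ih]
      constructor
      · rintro (h | ⟨e, he, hx⟩)
        · rcases List.mem_append.mp h with h' | h'
          · exact Or.inl h'
          · simp at h'; subst h'; exact Or.inr ⟨d, List.mem_cons_self .., hg⟩
        · exact Or.inr ⟨e, List.mem_cons_of_mem _ he, hx⟩
      · rintro (h | ⟨e, he, hx⟩)
        · exact Or.inl (List.mem_append_left _ h)
        · rcases List.mem_cons.mp he with rfl | he'
          · rw [hg] at hx; left; simp [Option.some_injective _ hx]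
          · exact Or.inr ⟨e, he', hx⟩

lemma mem_candidates (diffs : List Int) (x : Int) :
    x ∈ pvCandidates diffs ↔ ∃ d ∈ diffs, pvRank.get? d = some x := by
  unfold pvCandidates
  rw [mem_foldl_cand]
  simp

lemma min?_eq_of (l : List Int) (k : Int) (hk : k ∈ l) (hlb : ∀ x ∈ l, k ≤ x) :
    PySem.List.min? l (fun x => x) = some k := by
  cases hm : PySem.List.min? l (fun x => x) with
  | none => rw [PySem.List.min?_eq_none_iff] at hm; subst hm; simp at hk
  | some m =>
    have h1 := PySem.List.min?_mem hm
    have h2 := PySem.List.min?_isMin hm k hk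
    have h3 := hlb m h1
    have : m = k := le_antisymm h2 h3
    rw [this]

-- ===== VERDICT (by name: the statement is the Claim_ definition above) =====
theorem derive_difficulty_id_spec : Claim_equal_derive_difficulty_id := by
  intro difficulties expansion mythic_only _dom
  unfold Spec_derive_difficulty_id derive_difficulty_id derive_difficulty_id_alt
  cases mythic_only with
  | true => simp
  | false =>
    by_cases hnil : difficulties = []
    · simp [hnil]
    · simp only [hnil, false_and, if_false, Bool.false_eq_true]
      by_cases hm0 : (16:Int) ∈ difficulties
      · have hloop : pvLoopA pvPriority difficulties = some 16 := by
          simp [pvLoopA, pvPriority, hm0]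
        have hcm : ((0:Int)) ∈ pvCandidates difficulties :=
          (mem_candidates difficulties 0).mpr ⟨(16:Int), hm0, by decide⟩
        have hlb : ∀ x ∈ pvCandidates difficulties, (0:Int) ≤ x := by
          intro x hx
          obtain ⟨e, he, hg⟩ := (mem_candidates difficulties x).mp hx
          obtain ⟨rfl,rfl⟩|⟨rfl,rfl⟩|⟨rfl,rfl⟩|⟨rfl,rfl⟩|⟨rfl,rfl⟩|⟨rfl,rfl⟩|⟨rfl,rfl⟩|⟨rfl,rfl⟩|⟨rfl,rfl⟩|⟨rfl,rfl⟩|⟨rfl,rfl⟩ := pvRank_cases e x hg <;> omega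
        have hne : pvCandidates difficulties ≠ [] := fun h => by rw [h] at hcm; simp at hcm
        rw [hloop, if_neg hne, min?_eq_of _ _ hcm hlb]
        rfl
      by_cases hm1 : (23:Int) ∈ difficulties
      · have hloop : pvLoopA pvPriority difficulties = some 23 := by
          simp [pvLoopA, pvPriority, hm0, hm1]
        have hcm : ((1:Int)) ∈ pvCandidates difficulties :=
          (mem_candidates difficulties 1).mpr ⟨(23:Int), hm1, by decide⟩
        have hlb : ∀ x ∈ pvCandidates difficulties, (1:Int) ≤ x := by
          intro x hx
          obtain ⟨e, he, hg⟩ := (mem_candidates difficulties x).mp hx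
          obtain ⟨rfl,rfl⟩|⟨rfl,rfl⟩|⟨rfl,rfl⟩|⟨rfl,rfl⟩|⟨rfl,rfl⟩|⟨rfl,rfl⟩|⟨rfl,rfl⟩|⟨rfl,rfl⟩|⟨rfl,rfl⟩|⟨rfl,rfl⟩|⟨rfl,rfl⟩ := pvRank_cases e x hg <;> first | omega | simp_all
        have hne : pvCandidates difficulties ≠ [] := fun h => by rw [h] at hcm; simp at hcm
        rw [hloop, if_neg hne, min?_eq_of _ _ hcm hlb]
        rfl
      by_cases hm2 : (15:Int) ∈ difficulties
      · have hloop : pvLoopA pvPriority difficulties = some 15 := by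
          simp [pvLoopA, pvPriority, hm0, hm1, hm2]
        have hcm : ((2:Int)) ∈ pvCandidates difficulties :=
          (mem_candidates difficulties 2).mpr ⟨(15:Int), hm2, by decide⟩
        have hlb : ∀ x ∈ pvCandidates difficulties, (2:Int) ≤ x := by
          intro x hx
          obtain ⟨e, he, hg⟩ := (mem_candidates difficulties x).mp hx
          obtain ⟨rfl,rfl⟩|⟨rfl,rfl⟩|⟨rfl,rfl⟩|⟨rfl,rfl⟩|⟨rfl,rfl⟩|⟨rfl,rfl⟩|⟨rfl,rfl⟩|⟨rfl,rfl⟩|⟨rfl,rfl⟩|⟨rfl,rfl⟩|⟨rfl,rfl⟩ := pvRank_cases e x hg <;> first | omega | simp_all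
        have hne : pvCandidates difficulties ≠ [] := fun h => by rw [h] at hcm; simp at hcm
        rw [hloop, if_neg hne, min?_eq_of _ _ hcm hlb]
        rfl
      by_cases hm3 : (6:Int) ∈ difficulties
      · have hloop : pvLoopA pvPriority difficulties = some 6 := by
          simp [pvLoopA, pvPriority, hm0, hm1, hm2, hm3]
        have hcm : ((3:Int)) ∈ pvCandidates difficulties :=
          (mem_candidates difficulties 3).mpr ⟨(6:Int), hm3, by decide⟩
        have hlb : ∀ x ∈ pvCandidates difficulties, (3:Int) ≤ x := by
          intro x hx
          obtain ⟨e, he, hg⟩ := (mem_candidates difficulties x).mp hx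
          obtain ⟨rfl,rfl⟩|⟨rfl,rfl⟩|⟨rfl,rfl⟩|⟨rfl,rfl⟩|⟨rfl,rfl⟩|⟨rfl,rfl⟩|⟨rfl,rfl⟩|⟨rfl,rfl⟩|⟨rfl,rfl⟩|⟨rfl,rfl⟩|⟨rfl,rfl⟩ := pvRank_cases e x hg <;> first | omega | simp_all
        have hne : pvCandidates difficulties ≠ [] := fun h => by rw [h] at hcm; simp at hcm
        rw [hloop, if_neg hne, min?_eq_of _ _ hcm hlb]
        rfl
      by_cases hm4 : (5:Int) ∈ difficulties
      · have hloop : pvLoopA pvPriority difficulties = some 5 := by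
          simp [pvLoopA, pvPriority, hm0, hm1, hm2, hm3, hm4]
        have hcm : ((4:Int)) ∈ pvCandidates difficulties :=
          (mem_candidates difficulties 4).mpr ⟨(5:Int), hm4, by decide⟩
        have hlb : ∀ x ∈ pvCandidates difficulties, (4:Int) ≤ x := by
          intro x hx
          obtain ⟨e, he, hg⟩ := (mem_candidates difficulties x).mp hx
          obtain ⟨rfl,rfl⟩|⟨rfl,rfl⟩|⟨rfl,rfl⟩|⟨rfl,rfl⟩|⟨rfl,rfl⟩|⟨rfl,rfl⟩|⟨rfl,rfl⟩|⟨rfl,rfl⟩|⟨rfl,rfl⟩|⟨rfl,rfl⟩|⟨rfl,rfl⟩ := pvRank_cases e x hg <;> first | omega | simp_all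
        have hne : pvCandidates difficulties ≠ [] := fun h => by rw [h] at hcm; simp at hcm
        rw [hloop, if_neg hne, min?_eq_of _ _ hcm hlb]
        rfl
      by_cases hm5 : (14:Int) ∈ difficulties
      · have hloop : pvLoopA pvPriority difficulties = some 14 := by
          simp [pvLoopA, pvPriority, hm0, hm1, hm2, hm3, hm4, hm5]
        have hcm : ((5:Int)) ∈ pvCandidates difficulties :=
          (mem_candidates difficulties 5).mpr ⟨(14:Int), hm5, by decide⟩
        have hlb : ∀ x ∈ pvCandidates difficulties, (5:Int) ≤ x := by
          intro x hx
          obtain ⟨e, he, hg⟩ := (mem_candidates difficulties x).mp hx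
          obtain ⟨rfl,rfl⟩|⟨rfl,rfl⟩|⟨rfl,rfl⟩|⟨rfl,rfl⟩|⟨rfl,rfl⟩|⟨rfl,rfl⟩|⟨rfl,rfl⟩|⟨rfl,rfl⟩|⟨rfl,rfl⟩|⟨rfl,rfl⟩|⟨rfl,rfl⟩ := pvRank_cases e x hg <;> first | omega | simp_all
        have hne : pvCandidates difficulties ≠ [] := fun h => by rw [h] at hcm; simp at hcm
        rw [hloop, if_neg hne, min?_eq_of _ _ hcm hlb]
        rfl
      by_cases hm6 : (4:Int) ∈ difficulties
      · have hloop : pvLoopA pvPriority difficulties = some 4 := by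
          simp [pvLoopA, pvPriority, hm0, hm1, hm2, hm3, hm4, hm5, hm6]
        have hcm : ((6:Int)) ∈ pvCandidates difficulties :=
          (mem_candidates difficulties 6).mpr ⟨(4:Int), hm6, by decide⟩
        have hlb : ∀ x ∈ pvCandidates difficulties, (6:Int) ≤ x := by
          intro x hx
          obtain ⟨e, he, hg⟩ := (mem_candidates difficulties x).mp hx
          obtain ⟨rfl,rfl⟩|⟨rfl,rfl⟩|⟨rfl,rfl⟩|⟨rfl,rfl⟩|⟨rfl,rfl⟩|⟨rfl,rfl⟩|⟨rfl,rfl⟩|⟨rfl,rfl⟩|⟨rfl,rfl⟩|⟨rfl,rfl⟩|⟨rfl,rfl⟩ := pvRank_cases e x hg <;> first | omega | simp_all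
        have hne : pvCandidates difficulties ≠ [] := fun h => by rw [h] at hcm; simp at hcm
        rw [hloop, if_neg hne, min?_eq_of _ _ hcm hlb]
        rfl
      by_cases hm7 : (3:Int) ∈ difficulties
      · have hloop : pvLoopA pvPriority difficulties = some 3 := by
          simp [pvLoopA, pvPriority, hm0, hm1, hm2, hm3, hm4, hm5, hm6, hm7]
        have hcm : ((7:Int)) ∈ pvCandidates difficulties :=
          (mem_candidates difficulties 7).mpr ⟨(3:Int), hm7, by decide⟩
        have hlb : ∀ x ∈ pvCandidates difficulties, (7:Int) ≤ x := by
          intro x hx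
          obtain ⟨e, he, hg⟩ := (mem_candidates difficulties x).mp hx
          obtain ⟨rfl,rfl⟩|⟨rfl,rfl⟩|⟨rfl,rfl⟩|⟨rfl,rfl⟩|⟨rfl,rfl⟩|⟨rfl,rfl⟩|⟨rfl,rfl⟩|⟨rfl,rfl⟩|⟨rfl,rfl⟩|⟨rfl,rfl⟩|⟨rfl,rfl⟩ := pvRank_cases e x hg <;> first | omega | simp_all
        have hne : pvCandidates difficulties ≠ [] := fun h => by rw [h] at hcm; simp at hcm
        rw [hloop, if_neg hne, min?_eq_of _ _ hcm hlb]
        rfl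
      by_cases hm8 : (2:Int) ∈ difficulties
      · have hloop : pvLoopA pvPriority difficulties = some 2 := by
          simp [pvLoopA, pvPriority, hm0, hm1, hm2, hm3, hm4, hm5, hm6, hm7, hm8]
        have hcm : ((8:Int)) ∈ pvCandidates difficulties :=
          (mem_candidates difficulties 8).mpr ⟨(2:Int), hm8, by decide⟩
        have hlb : ∀ x ∈ pvCandidates difficulties, (8:Int) ≤ x := by
          intro x hx
          obtain ⟨e, he, hg⟩ := (mem_candidates difficulties x).mp hx
          obtain ⟨rfl,rfl⟩|⟨rfl,rfl⟩|⟨rfl,rfl⟩|⟨rfl,rfl⟩|⟨rfl,rfl⟩|⟨rfl,rfl⟩|⟨rfl,rfl⟩|⟨rfl,rfl⟩|⟨rfl,rfl⟩|⟨rfl,rfl⟩|⟨rfl,rfl⟩ := pvRank_cases e x hg <;> first | omega | simp_all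
        have hne : pvCandidates difficulties ≠ [] := fun h => by rw [h] at hcm; simp at hcm
        rw [hloop, if_neg hne, min?_eq_of _ _ hcm hlb]
        rfl
      by_cases hm9 : (17:Int) ∈ difficulties
      · have hloop : pvLoopA pvPriority difficulties = some 17 := by
          simp [pvLoopA, pvPriority, hm0, hm1, hm2, hm3, hm4, hm5, hm6, hm7, hm8, hm9]
        have hcm : ((9:Int)) ∈ pvCandidates difficulties :=
          (mem_candidates difficulties 9).mpr ⟨(17:Int), hm9, by decide⟩
        have hlb : ∀ x ∈ pvCandidates difficulties, (9:Int) ≤ x := by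
          intro x hx
          obtain ⟨e, he, hg⟩ := (mem_candidates difficulties x).mp hx
          obtain ⟨rfl,rfl⟩|⟨rfl,rfl⟩|⟨rfl,rfl⟩|⟨rfl,rfl⟩|⟨rfl,rfl⟩|⟨rfl,rfl⟩|⟨rfl,rfl⟩|⟨rfl,rfl⟩|⟨rfl,rfl⟩|⟨rfl,rfl⟩|⟨rfl,rfl⟩ := pvRank_cases e x hg <;> first | omega | simp_all
        have hne : pvCandidates difficulties ≠ [] := fun h => by rw [h] at hcm; simp at hcm
        rw [hloop, if_neg hne, min?_eq_of _ _ hcm hlb]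
        rfl
      by_cases hm10 : (0:Int) ∈ difficulties
      · have hloop : pvLoopA pvPriority difficulties = some 0 := by
          simp [pvLoopA, pvPriority, hm0, hm1, hm2, hm3, hm4, hm5, hm6, hm7, hm8, hm9, hm10]
        have hcm : ((10:Int)) ∈ pvCandidates difficulties :=
          (mem_candidates difficulties 10).mpr ⟨(0:Int), hm10, by decide⟩
        have hlb : ∀ x ∈ pvCandidates difficulties, (10:Int) ≤ x := by
          intro x hx
          obtain ⟨e, he, hg⟩ := (mem_candidates difficulties x).mp hx
          obtain ⟨rfl,rfl⟩|⟨rfl,rfl⟩|⟨rfl,rfl⟩|⟨rfl,rfl⟩|⟨rfl,rfl⟩|⟨rfl,rfl⟩|⟨rfl,rfl⟩|⟨rfl,rfl⟩|⟨rfl,rfl⟩|⟨rfl,rfl⟩|⟨rfl,rfl⟩ := pvRank_cases e x hg <;> first | omega | simp_all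
        have hne : pvCandidates difficulties ≠ [] := fun h => by rw [h] at hcm; simp at hcm
        rw [hloop, if_neg hne, min?_eq_of _ _ hcm hlb]
        rfl
      · have hc : pvCandidates difficulties = [] := by
          rw [List.eq_nil_iff_forall_not_mem]
          intro x hx
          obtain ⟨e, he, hg⟩ := (mem_candidates difficulties x).mp hx
          obtain ⟨rfl,rfl⟩|⟨rfl,rfl⟩|⟨rfl,rfl⟩|⟨rfl,rfl⟩|⟨rfl,rfl⟩|⟨rfl,rfl⟩|⟨rfl,rfl⟩|⟨rfl,rfl⟩|⟨rfl,rfl⟩|⟨rfl,rfl⟩|⟨rfl,rfl⟩ := pvRank_cases e x hg <;> simp_all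
        have hloop : pvLoopA pvPriority difficulties = none := by
          simp [pvLoopA, pvPriority, hm0, hm1, hm2, hm3, hm4, hm5, hm6, hm7, hm8, hm9, hm10]
        rw [hloop, if_pos hc]
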